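-- pv_equiv track=rewrite | github.com/Gyaha/AOC24 | 17_4.py | rec_run
-- ===== SOURCE A (Python) =====
-- cache = {}
--
-- def rec_run(a):
--     # Run the program on a simple function
--     if a in cache:
--         return cache[a]
--     initial_a = a
--     b = a % 8
--     b = b ^ 1
--     c = a // pow(2, b)
--     a = a // pow(2, 3)
--     b = b ^ c
--     b = b ^ 6
--     out = [b % 8]
--     if a != 0:
--         out += rec_run(a)
--     cache[initial_a] = out
--     return out
-- ===== SOURCE B (Python) =====
-- cache = {}
--
-- def _ndigits(a):
--     # number of octal digits of a (1 for a < 8)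
--     return 1 if a < 8 else 1 + _ndigits(a // 8)
--
-- def _emit(x):
--     b = (x % 8) ^ 1
--     return (b ^ (x // 2 ** b) ^ 6) % 8
--
-- def rec_run(a):
--     # Positional re-implementation: each output byte depends only on a // 8**i,
--     # so build the list directly by digit index instead of recursing on a //= 8.
--     if a in cache:
--         return cache[a]
--     out = [_emit(a // 8 ** i) for i in range(_ndigits(a))]
--     cache[a] = out
--     return out
-- ===== Notes on version B (the rewrite author's own statement) =====
-- stated objective: alternative
-- what changed: Replaced the sequential self-recursion that mutates a (a //= 8) and concatenates suffix lists with a positional formulation: each output byte is computed independently from a // 8**i, so the result is one list comprehension over the digit indices; the module-level cache and its hit check are kept.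
import Mathlib
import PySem

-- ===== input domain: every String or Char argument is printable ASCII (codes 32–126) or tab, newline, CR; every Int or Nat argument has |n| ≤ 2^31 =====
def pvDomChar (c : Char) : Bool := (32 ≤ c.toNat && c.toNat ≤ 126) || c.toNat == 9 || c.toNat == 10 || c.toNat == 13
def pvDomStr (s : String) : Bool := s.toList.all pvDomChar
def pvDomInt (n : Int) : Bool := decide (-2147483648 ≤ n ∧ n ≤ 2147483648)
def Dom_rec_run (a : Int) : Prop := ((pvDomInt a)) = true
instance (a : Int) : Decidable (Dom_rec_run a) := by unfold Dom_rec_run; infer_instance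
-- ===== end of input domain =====

-- B recomputes each output byte independently from a // 8**i (positional, one list over digit indices)
-- instead of A's self-recursion that mutates a and concatenates suffix lists; same return values.
-- Both Pythons read/write a shared module-level cache, so equivalence here is about the return value only.


-- ===== PORT A =====
-- A is recursive with no structural bound for negative a (there it recurses forever, i.e. Python's
-- RecursionError); the port uses fuel a.toNat + 1, which is sufficient on Pre_ (0 ≤ a) since a // 8 < a.
def recRunFuel : Nat → Int → List Int
  | 0, _ => []
  | n + 1, a =>
    let b : Int := PySem.Int.bxor (PySem.Int.mod a 8) 1
    let c := PySem.Int.floordiv a (2 ^ b.toNat)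
    let a' := PySem.Int.floordiv a 8
    let b' := PySem.Int.bxor (PySem.Int.bxor b c) 6
    let out := [PySem.Int.mod b' 8]
    if a' ≠ 0 then out ++ recRunFuel n a' else out

def rec_run (a : Int) : List Int := recRunFuel (a.toNat + 1) a

-- ===== PORT B =====
-- B's _ndigits is recursive with no structural bound for negative a either; same fuel bound a.toNat + 1
-- (sufficient on Pre_) makes the port total.
def ndigitsFuel : Nat → Int → Nat
  | 0, _ => 1
  | n + 1, a => if a < 8 then 1 else 1 + ndigitsFuel n (PySem.Int.floordiv a 8)

def emit (x : Int) : Int :=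
  let b : Int := PySem.Int.bxor (PySem.Int.mod x 8) 1
  PySem.Int.mod (PySem.Int.bxor (PySem.Int.bxor b (PySem.Int.floordiv x (2 ^ b.toNat))) 6) 8

def rec_run_alt (a : Int) : List Int :=
  (List.range (ndigitsFuel (a.toNat + 1) a)).map (fun i => emit (PySem.Int.floordiv a (8 ^ i)))

-- ===== PRECONDITION & SPEC =====
-- Pre_ excludes a < 0: there Python A recurses forever (RecursionError), returning no value.
def Pre_rec_run (a : Int) : Prop := 0 ≤ a
instance (a : Int) : Decidable (Pre_rec_run a) := by unfold Pre_rec_run; infer_instance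
def pvWitness_rec_run : Int := (5)

def Spec_rec_run (a : Int) (out : List Int) : Prop := out = rec_run_alt a
instance (a : Int) (out : List Int) : Decidable (Spec_rec_run a out) := by unfold Spec_rec_run; infer_instance

-- ===== CLAIM (what is proved, stated in full; the proofs are below) =====
def Claim_equal_rec_run : Prop := ∀ (a : Int), Dom_rec_run a → Pre_rec_run a → Spec_rec_run a (rec_run a)

-- ===== LEMMAS AND PROOFS =====

theorem fd8_nonneg {a : Int} (h : 0 ≤ a) : 0 ≤ PySem.Int.floordiv a 8 := by
  rw [PySem.Int.floordiv_eq_ediv_of_pos (by norm_num)]; omega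

theorem fd8_lt {a : Int} (h : 0 < a) : PySem.Int.floordiv a 8 < a := by
  rw [PySem.Int.floordiv_eq_ediv_of_pos (by norm_num)]; omega

theorem ediv8pow (a : Int) (i : Nat) : a / 8 / 8 ^ i = a / 8 ^ (i + 1) := by
  rw [Int.ediv_ediv_of_nonneg (show (0:Int) ≤ 8 by norm_num), pow_succ']

theorem fuel_eq_map :
    ∀ (n : Nat) (a : Int), 0 ≤ a → a.toNat < n →
      recRunFuel n a =
        (List.range (ndigitsFuel n a)).map (fun i => emit (PySem.Int.floordiv a (8 ^ i))) := by
  intro n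
  induction n with
  | zero => intro a _ h; omega
  | succ n ih =>
    intro a ha hn
    by_cases h8 : a < 8
    · have h0 : PySem.Int.floordiv a 8 = 0 := by
        rw [PySem.Int.floordiv_eq_ediv_of_pos (by norm_num)]
        exact Int.ediv_eq_zero_of_lt ha h8
      have h0' : a / 8 = 0 := Int.ediv_eq_zero_of_lt ha h8
      simp [recRunFuel, ndigitsFuel, h8, h0', emit]
    · have hapos : (0:Int) < a := by omega
      have ha' : 0 ≤ PySem.Int.floordiv a 8 := fd8_nonneg ha
      have hlt : PySem.Int.floordiv a 8 < a := fd8_lt hapos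
      have hne : PySem.Int.floordiv a 8 ≠ 0 := by
        rw [PySem.Int.floordiv_eq_ediv_of_pos (by norm_num)]
        have : (1:Int) ≤ a / 8 := by
          apply Int.le_ediv_iff_mul_le (by norm_num) |>.mpr; omega
        omega
      have hfuel : (PySem.Int.floordiv a 8).toNat < n := by omega
      have hrec := ih (PySem.Int.floordiv a 8) ha' hfuel
      simp only [recRunFuel, ndigitsFuel, if_neg (by omega : ¬ a < 8), if_pos hne, hrec]
      rw [Nat.add_comm 1, List.range_succ_eq_map, List.map_cons, List.map_map]
      rw [List.singleton_append]
      congr 1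
      · simp [emit]
      apply List.map_congr_left
      intro i _
      have hfd : PySem.Int.floordiv (PySem.Int.floordiv a 8) (8 ^ i) = PySem.Int.floordiv a (8 ^ (i + 1)) := by
        rw [PySem.Int.floordiv_eq_ediv_of_pos (show (0:Int) < 8 by norm_num),
            PySem.Int.floordiv_eq_ediv_of_pos (show (0:Int) < (8:Int) ^ i by positivity),
            PySem.Int.floordiv_eq_ediv_of_pos (show (0:Int) < (8:Int) ^ (i + 1) by positivity)]
        exact ediv8pow a i
      simp only [Function.comp_apply, Nat.succ_eq_add_one]
      rw [hfd]

-- ===== VERDICT (by name: the statement is the Claim_ definition above) =====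
theorem rec_run_spec : Claim_equal_rec_run := by
  intro a _ ha
  unfold Spec_rec_run rec_run rec_run_alt
  exact fuel_eq_map _ _ ha (by omega)
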